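-- pv_equiv track=rewrite | github.com/niragam/zuma-ai-solver | zuma_problem.py | find_positions_for_ball
-- ===== SOURCE A (Python) =====
-- def find_positions_for_ball(line, ball):
--     """
--     Find positions where inserting the ball could affect groups of the same color.
--     Returns positions adjacent to groups of the same color.
--     """
--     positions = set()
--     line_length = len(line)
--     index = 0
--     while index < line_length:
--         current_color = line[index]
--         count = 1
--         # Count consecutive balls of the same color
--         while index + count < line_length and line[index + count] == current_color:
--             count += 1
--         if current_color == ball:
--             # Positions before and after the group
--             if index > 0:
--                 positions.add(index)
--             if index + count <= line_length:
--                 positions.add(index + count)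
--             # Middle positions within the group
--             for pos in range(index + 1, index + count):
--                 positions.add(pos)
--         index += count  # Move to the next group
--     return positions if positions else None
-- ===== SOURCE B (Python) =====
-- def find_positions_for_ball(line, ball):
--     n = len(line)
--     positions = {p for p in range(1, n + 1)
--                  if line[p - 1] == ball or (p < n and line[p] == ball)}
--     return positions if positions else None
-- ===== Notes on version B (the rewrite author's own statement) =====
-- stated objective: simpler
-- what changed: Replaced A's two-level group scan (outer while over group starts, inner while counting the run, then three kinds of position inserts per ball-colored group) with a single flat pass over insertion positions 1..len(line), keeping p exactly when a cell adjacent to p holds the ball's color.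
import Mathlib
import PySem

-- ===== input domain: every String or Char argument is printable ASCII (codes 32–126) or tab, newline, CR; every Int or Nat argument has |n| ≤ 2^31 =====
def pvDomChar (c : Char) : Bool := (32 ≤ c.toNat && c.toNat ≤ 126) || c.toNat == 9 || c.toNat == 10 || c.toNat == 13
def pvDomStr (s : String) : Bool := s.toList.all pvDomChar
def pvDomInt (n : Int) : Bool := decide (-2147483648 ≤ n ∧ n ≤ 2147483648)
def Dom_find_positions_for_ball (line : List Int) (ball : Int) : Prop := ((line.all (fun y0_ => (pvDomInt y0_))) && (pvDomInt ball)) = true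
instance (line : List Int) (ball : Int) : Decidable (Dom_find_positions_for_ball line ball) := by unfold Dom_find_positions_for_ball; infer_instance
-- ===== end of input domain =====

-- B replaces A's group-by-group scan with one flat per-position adjacency test (simpler decomposition, same O(n) cost).
-- Both Pythons return a SET (iteration order unobservable); both ports canonicalize the returned set in ascending order.

-- ===== PORT A =====
-- inner while: `while index + count < line_length and line[index + count] == current_color: count += 1`
def pvRun (line : List Int) (cc : Int) (index count : Nat) : Nat :=
  if index + count < line.length ∧ PySem.List.pyGetD line ((index + count : Nat) : Int) 0 = cc then
    pvRun line cc index (count + 1)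
  else count
termination_by line.length - (index + count)
decreasing_by omega

-- the run length is at least the starting count (cited by pvLoopA's decreasing_by)
theorem pvRun_ge (line : List Int) (cc : Int) (index count : Nat) :
    count ≤ pvRun line cc index count := by
  fun_induction pvRun <;> omega

-- outer while over group starts, with the three kinds of `positions.add`
def pvLoopA (line : List Int) (ball : Int) (index : Nat) (positions : PySem.Set Int) : PySem.Set Int :=
  if index < line.length then
    let cc := PySem.List.pyGetD line ((index : Nat) : Int) 0
    let count := pvRun line cc index 1
    let positions1 :=
      if cc = ball then
        let s1 := if 0 < index then PySem.Set.add positions ((index : Nat) : Int) else positions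
        let s2 := if index + count ≤ line.length then PySem.Set.add s1 ((index + count : Nat) : Int) else s1
        (PySem.List.pyRange ((index : Nat) + 1) ((index : Nat) + (count : Nat))).foldl PySem.Set.add s2
      else positions
    pvLoopA line ball (index + count) positions1
  else positions
termination_by line.length - index
decreasing_by have := pvRun_ge line (PySem.List.pyGetD line ((index : Nat) : Int) 0) index 1; omega

def find_positions_for_ball (line : List Int) (ball : Int) : Option (List Int) :=
  let positions := pvLoopA line ball 0 PySem.Set.empty
  if positions.isEmpty then none else some (PySem.List.sorted positions (fun x => x))

-- ===== PORT B =====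
def find_positions_for_ball_alt (line : List Int) (ball : Int) : Option (List Int) :=
  let n : Int := (line.length : Int)
  let positions := PySem.Set.ofList
    ((PySem.List.pyRange 1 (n + 1)).filter
      (fun p => PySem.List.pyGetD line (p - 1) 0 == ball ||
                (decide (p < n) && PySem.List.pyGetD line p 0 == ball)))
  if positions.isEmpty then none else some (PySem.List.sorted positions (fun x => x))

-- ===== PRECONDITION & SPEC =====
def Spec_find_positions_for_ball (line : List Int) (ball : Int) (out : Option (List Int)) : Prop := out = find_positions_for_ball_alt line ball
instance (line : List Int) (ball : Int) (out : Option (List Int)) : Decidable (Spec_find_positions_for_ball line ball out) := by unfold Spec_find_positions_for_ball; infer_instance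

-- ===== CLAIM (what is proved, stated in full; the proofs are below) =====
def Claim_equal_find_positions_for_ball : Prop := ∀ (line : List Int) (ball : Int), Dom_find_positions_for_ball line ball → Spec_find_positions_for_ball line ball (find_positions_for_ball line ball)

-- ===== LEMMAS AND PROOFS =====

-- facts about the inner-run counter
theorem pvRun_le (line : List Int) (cc : Int) (index count : Nat)
    (h : index + count ≤ line.length) : index + pvRun line cc index count ≤ line.length := by
  fun_induction pvRun <;> omega

theorem pvRun_mem (line : List Int) (cc : Int) (index count : Nat) :
    ∀ k, count ≤ k → k < pvRun line cc index count → line.getD (index + k) 0 = cc := by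
  fun_induction pvRun with
  | case1 count hg ih =>
    intro k hk1 hk2
    rcases Nat.eq_or_lt_of_le hk1 with h | h
    · subst h
      have := hg.2
      rwa [PySem.List.pyGetD_natCast] at this
    · exact ih k h hk2
  | case2 count hg =>
    intro k hk1 hk2; omega

theorem pvRun_max (line : List Int) (cc : Int) (index count : Nat) :
    index + pvRun line cc index count < line.length →
    line.getD (index + pvRun line cc index count) 0 ≠ cc := by
  fun_induction pvRun with
  | case1 count hg ih => exact ih
  | case2 count hg =>
    intro h hc
    rw [PySem.List.pyGetD_natCast] at hg
    exact hg ⟨h, hc⟩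

-- the suffix contribution of A's loop, stated over Nat positions
def pvT (line : List Int) (ball : Int) (index : Nat) (x : Int) : Prop :=
  ∃ p : Nat, x = (p : Int) ∧ 1 ≤ p ∧ p ≤ line.length ∧
    ((index < p ∧ line.getD (p - 1) 0 = ball) ∨ (index ≤ p ∧ p < line.length ∧ line.getD p 0 = ball))

theorem mem_pvLoopA (line : List Int) (ball : Int) (index : Nat) (positions : PySem.Set Int)
    (x : Int) : x ∈ pvLoopA line ball index positions ↔ x ∈ positions ∨ pvT line ball index x := by
  fun_induction pvLoopA with
  | case1 index positions h cc count positions1 ih =>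
    rw [ih]
    have hle : index + count ≤ line.length := pvRun_le line cc index 1 (by omega)
    have hcnt : 1 ≤ count := pvRun_ge line cc index 1
    have hrun : ∀ k, k < count → line.getD (index + k) 0 = cc := by
      intro k hk
      rcases Nat.eq_zero_or_pos k with h0 | h0
      · subst h0
        show line.getD (index + 0) 0 = cc
        simp only [cc, PySem.List.pyGetD_natCast, Nat.add_zero]
      · exact pvRun_mem line cc index 1 k h0 hk
    have hmax : index + count < line.length → line.getD (index + count) 0 ≠ cc :=
      pvRun_max line cc index 1
    have hpos1 : ∀ y, y ∈ positions1 ↔ y ∈ positions ∨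
        (cc = ball ∧ ∃ p : Nat, y = (p : Int) ∧ max index 1 ≤ p ∧ p ≤ index + count) := by
      intro y
      by_cases hcc : cc = ball
      · simp only [positions1, dif_pos hcc, ← PySem.Set.update_eq_foldl,
          PySem.Set.mem_update, dif_pos hle, PySem.List.mem_pyRange_one]
        by_cases hidx : 0 < index
        · simp only [dif_pos hidx, PySem.Set.mem_add]
          constructor
          · rintro (((hm | rfl) | rfl) | hr)
            · exact Or.inl hm
            · exact Or.inr ⟨hcc, index, rfl, by omega, by omega⟩
            · exact Or.inr ⟨hcc, index + count, rfl, by omega, by omega⟩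
            · exact Or.inr ⟨hcc, y.toNat, by omega, by omega, by omega⟩
          · rintro (hm | ⟨-, p, rfl, hp1, hp2⟩)
            · exact Or.inl (Or.inl (Or.inl hm))
            · by_cases hpi : p = index
              · subst hpi; exact Or.inl (Or.inl (Or.inr rfl))
              · by_cases hpc : p = index + count
                · subst hpc; exact Or.inl (Or.inr (by norm_cast))
                · exact Or.inr ⟨by omega, by omega⟩
        · simp only [dif_neg hidx, PySem.Set.mem_add]
          constructor
          · rintro ((hm | rfl) | hr)
            · exact Or.inl hm
            · exact Or.inr ⟨hcc, index + count, rfl, by omega, by omega⟩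
            · exact Or.inr ⟨hcc, y.toNat, by omega, by omega, by omega⟩
          · rintro (hm | ⟨-, p, rfl, hp1, hp2⟩)
            · exact Or.inl (Or.inl hm)
            · by_cases hpc : p = index + count
              · subst hpc; exact Or.inl (Or.inr (by norm_cast))
              · exact Or.inr ⟨by omega, by omega⟩
      · simp only [positions1, dif_neg hcc]
        simp [hcc]
    rw [hpos1]
    constructor
    · rintro ((hmem | hadd) | hT)
      · exact Or.inl hmem
      · -- an added position satisfies pvT at index
        rcases hadd with ⟨hcc, p, rfl, hp1, hp2⟩
        right
        by_cases hend : p = index + count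
        · exact ⟨p, rfl, by omega, by omega, Or.inl ⟨by omega, by
            have := hrun (count - 1) (by omega)
            rw [hend]
            have heq : index + count - 1 = index + (count - 1) := by omega
            rw [heq, this, hcc]⟩⟩
        · refine ⟨p, rfl, by omega, by omega, Or.inr ⟨by omega, by omega, by
            have := hrun (p - index) (by omega)
            have heq : index + (p - index) = p := by omega
            rw [heq] at this
            rw [this, hcc]⟩⟩
      · -- pvT at index+count implies pvT at index
        rcases hT with ⟨p, rfl, hp1, hp2, hcase⟩
        right
        rcases hcase with ⟨ha, hb⟩ | ⟨ha, hb, hc⟩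
        · exact ⟨p, rfl, hp1, hp2, Or.inl ⟨by omega, hb⟩⟩
        · exact ⟨p, rfl, hp1, hp2, Or.inr ⟨by omega, hb, hc⟩⟩
    · rintro (hmem | hT)
      · exact Or.inl (Or.inl hmem)
      · rcases hT with ⟨p, rfl, hp1, hp2, hcase⟩
        rcases hcase with ⟨ha, hb⟩ | ⟨ha, hb, hc⟩
        · -- line[p-1] = ball, index < p
          by_cases hin : p - 1 < index + count
          · -- the cell p-1 lies in the current run, so cc = ball and p is added
            have hcell : line.getD (index + (p - 1 - index)) 0 = cc := hrun (p - 1 - index) (by omega)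
            have heq : index + (p - 1 - index) = p - 1 := by omega
            rw [heq, hb] at hcell
            exact Or.inl (Or.inr ⟨hcell.symm, p, rfl, by omega, by omega⟩)
          · exact Or.inr ⟨p, rfl, hp1, hp2, Or.inl ⟨by omega, hb⟩⟩
        · -- line[p] = ball, index ≤ p < n
          by_cases hin : p < index + count
          · have hcell : line.getD (index + (p - index)) 0 = cc := hrun (p - index) (by omega)
            have heq : index + (p - index) = p := by omega
            rw [heq, hc] at hcell
            exact Or.inl (Or.inr ⟨hcell.symm, p, rfl, by omega, by omega⟩)
          · exact Or.inr ⟨p, rfl, hp1, hp2, Or.inr ⟨by omega, hb, hc⟩⟩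
  | case2 index positions h =>
    have : ¬ pvT line ball index x := by
      rintro ⟨p, rfl, hp1, hp2, hcase⟩
      omega
    simp [this]

theorem nodup_pvLoopA (line : List Int) (ball : Int) (index : Nat) (positions : PySem.Set Int)
    (h : positions.Nodup) : (pvLoopA line ball index positions).Nodup := by
  fun_induction pvLoopA with
  | case1 index positions hi cc count positions1 ih =>
    apply ih
    simp only [positions1]
    split
    · rw [← PySem.Set.update_eq_foldl]
      apply PySem.Set.nodup_update
      split
      · apply PySem.Set.nodup_add
        split
        · exact PySem.Set.nodup_add _ _ h
        · exact h
      · split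
        · exact PySem.Set.nodup_add _ _ h
        · exact h
    · exact h
  | case2 _ _ _ => exact h

-- ===== VERDICT (by name: the statement is the Claim_ definition above) =====
-- at index 0 the loop's contribution is exactly B's flat adjacency condition
theorem mem_filterB (line : List Int) (ball : Int) (x : Int) :
    (x ∈ (PySem.List.pyRange 1 ((line.length : Int) + 1)).filter
      (fun p => PySem.List.pyGetD line (p - 1) 0 == ball ||
                (decide (p < (line.length : Int)) && PySem.List.pyGetD line p 0 == ball))) ↔
    pvT line ball 0 x := by
  rw [List.mem_filter, PySem.List.mem_pyRange_one]
  simp only [Bool.or_eq_true, Bool.and_eq_true, beq_iff_eq, decide_eq_true_eq]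
  constructor
  · rintro ⟨⟨hx1, hx2⟩, hcond⟩
    have hx : x = ((x.toNat : Nat) : Int) := by omega
    have hx1' : x - 1 = ((x.toNat - 1 : Nat) : Int) := by omega
    refine ⟨x.toNat, by omega, by omega, by omega, ?_⟩
    rcases hcond with hc | ⟨hlt, hc⟩
    · rw [hx1', PySem.List.pyGetD_natCast] at hc
      exact Or.inl ⟨by omega, hc⟩
    · rw [hx, PySem.List.pyGetD_natCast] at hc
      exact Or.inr ⟨by omega, by omega, hc⟩
  · rintro ⟨p, rfl, hp1, hp2, hcase⟩
    refine ⟨⟨by omega, by omega⟩, ?_⟩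
    rcases hcase with ⟨-, hc⟩ | ⟨-, hlt, hc⟩
    · left
      have h1 : ((p : Int) - 1) = ((p - 1 : Nat) : Int) := by omega
      rw [h1, PySem.List.pyGetD_natCast]
      exact hc
    · right
      rw [PySem.List.pyGetD_natCast]
      exact ⟨by omega, hc⟩

-- ===== VERDICT (by name: the statement is the Claim_ definition above) =====
theorem find_positions_for_ball_spec : Claim_equal_find_positions_for_ball := by
  intro line ball _
  unfold Spec_find_positions_for_ball find_positions_for_ball find_positions_for_ball_alt
  simp only []
  set A := pvLoopA line ball 0 PySem.Set.empty with hA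
  set L := (PySem.List.pyRange 1 ((line.length : Int) + 1)).filter
      (fun p => PySem.List.pyGetD line (p - 1) 0 == ball ||
                (decide (p < (line.length : Int)) && PySem.List.pyGetD line p 0 == ball)) with hL
  have hAmem : ∀ x, x ∈ A ↔ pvT line ball 0 x := by
    intro x
    rw [hA, mem_pvLoopA]
    simp [PySem.Set.empty]
  have hAnodup : A.Nodup := nodup_pvLoopA line ball 0 PySem.Set.empty List.nodup_nil
  have hLnodup : L.Nodup := (PySem.List.nodup_pyRange_one 1 ((line.length : Int) + 1)).filter _
  have hLpair : L.Pairwise (· < ·) :=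
    (PySem.List.pairwise_lt_pyRange_one 1 ((line.length : Int) + 1)).filter _
  have hpermAL : L.Perm A :=
    (List.perm_ext_iff_of_nodup hLnodup hAnodup).mpr
      (fun a => (mem_filterB line ball a).trans (hAmem a).symm)
  have hpermpsL : L.Perm (PySem.Set.ofList L) :=
    (List.perm_ext_iff_of_nodup hLnodup (PySem.Set.nodup_ofList L)).mpr
      (fun a => (PySem.Set.mem_ofList L a).symm)
  have hsortA : PySem.List.sorted A (fun x => x) = L :=
    PySem.List.sorted_eq_of_perm_of_pairwise_lt A L _ hpermAL hLpair
  have hsortB : PySem.List.sorted (PySem.Set.ofList L) (fun x => x) = L :=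
    PySem.List.sorted_eq_of_perm_of_pairwise_lt _ L _ hpermpsL hLpair
  have hlen : A.length = (PySem.Set.ofList L).length :=
    (hpermAL.symm.trans hpermpsL).length_eq
  have hE : A.isEmpty = (PySem.Set.ofList L).isEmpty := by
    cases h1 : A.isEmpty <;> cases h2 : (PySem.Set.ofList L).isEmpty <;>
      first
        | rfl
        | (exfalso
           rw [List.isEmpty_eq_false_iff_exists_mem] at *
           rw [List.isEmpty_iff_length_eq_zero] at *
           first
             | (obtain ⟨z, hz⟩ := h1; have := List.length_pos_of_mem hz; omega)
             | (obtain ⟨z, hz⟩ := h2; have := List.length_pos_of_mem hz; omega))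
  rw [hE, hsortA, hsortB]
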